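-- pv_equiv track=rewrite | github.com/Parthivsurya/Codeforces-Leetcode | given x and n give the possible combination.py | power_sum
-- ===== SOURCE A (Python) =====
-- def power_sum(x, n, num=1):
--     if x == 0:
--         return 1
--     if x < 0:
--         return 0
--     if num ** n > x:
--         return 0
--     take = power_sum(x - num**n, n, num + 1)
--     skip = power_sum(x, n, num + 1)
--     return take + skip
-- ===== SOURCE B (Python) =====
-- def power_sum(x, n, num=1):
--     if x == 0:
--         return 1
--     if x < 0:
--         return 0
--     # bottom-up subset-sum counting DP over the bases num, num+1, ... with k**n <= x
--     ways = [1] + [0] * x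
--     k = num
--     while k ** n <= x:
--         p = k ** n
--         for s in range(x, p - 1, -1):
--             ways[s] += ways[s - p]
--         k += 1
--     return ways[x]
-- ===== Notes on version B (the rewrite author's own statement) =====
-- stated objective: alternative
-- what changed: Replaced the exponential take/skip branching recursion by a bottom-up subset-sum counting DP over the bases k^n <= x (one ways[0..x] table, processed base by base); the DP trades A's recursion-tree blowup (worst for small n) for an x-sized table.
-- outside the precondition, e.g. on power_sum(1, 2, -1): A returns 3, B returns 4; on power_sum(1, 1, -1): A returns 4, B raises IndexError; on power_sum(4, 2, -1): A returns 2, B returns 2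
import Mathlib
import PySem

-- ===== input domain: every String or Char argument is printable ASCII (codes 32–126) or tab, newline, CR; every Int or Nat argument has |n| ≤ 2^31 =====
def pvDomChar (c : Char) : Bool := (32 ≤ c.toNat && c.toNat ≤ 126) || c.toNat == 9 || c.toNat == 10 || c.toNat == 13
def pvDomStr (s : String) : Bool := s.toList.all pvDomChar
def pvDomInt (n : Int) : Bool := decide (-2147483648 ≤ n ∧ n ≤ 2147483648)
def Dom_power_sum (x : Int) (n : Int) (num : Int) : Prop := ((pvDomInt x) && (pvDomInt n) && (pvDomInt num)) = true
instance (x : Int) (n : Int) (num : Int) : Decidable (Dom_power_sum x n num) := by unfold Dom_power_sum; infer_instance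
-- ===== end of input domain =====

-- B replaces A's take/skip branching recursion by a bottom-up subset-sum counting DP
-- over the bases k^n ≤ x (objective: alternative algorithm, one ways[0..x] table).

-- ===== PORT A =====
-- A's recursion, with a fuel counter as a pure totality device; the fuel chosen in
-- power_sum is proved sufficient on Pre_ (goA_eq_cnt), so the 0-fuel branch is never hit there.
def powerSumGoA (n : Int) : Nat → Int → Int → Int
  | 0, _, _ => 0
  | f + 1, x, num =>
    if x = 0 then 1
    else if x < 0 then 0
    else if num ^ n.toNat > x then 0
    else powerSumGoA n f (x - num ^ n.toNat) (num + 1) + powerSumGoA n f x (num + 1)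

def power_sum (x : Int) (n : Int) (num : Int) : Int :=
  powerSumGoA n ((x + 1 - num).toNat + 1) x num

-- ===== PORT B =====
-- The Python list `ways` is modelled by its index→value map (all reads/writes are
-- in range inside Pre_); `pvUpd p w s` is one `ways[s] += ways[s-p]`.
def pvUpd (p : Int) (w : Int → Int) (s : Int) : Int → Int :=
  fun t => if t = s then w s + w (s - p) else w t

-- the inner `for s in range(x, p-1, -1)` loop
def pvInner (x : Int) (p : Int) (w : Int → Int) : Int → Int :=
  (PySem.List.pyRange x (p - 1) (-1)).foldl (pvUpd p) w

-- the outer `while k ** n <= x` loop, fueled (fuel proved sufficient on Pre_)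
def powerSumGoB (n : Int) (x : Int) : Nat → Int → (Int → Int) → (Int → Int)
  | 0, _, w => w
  | f + 1, k, w =>
    if k ^ n.toNat ≤ x then powerSumGoB n x f (k + 1) (pvInner x (k ^ n.toNat) w)
    else w

def power_sum_alt (x : Int) (n : Int) (num : Int) : Int :=
  if x = 0 then 1
  else if x < 0 then 0
  else powerSumGoB n x ((x + 1 - num).toNat) num (fun t => if t = 0 then 1 else 0) x

-- ===== PRECONDITION & SPEC =====
-- For x > 0, Pre_ requires 1 ≤ n and 1 ≤ num: with n ≤ 0 the Python A exhausts the
-- recursion stack (RecursionError); with the non-default helper argument num ≤ 0 A's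
-- pruning guard `num ** n > x` behaves erratically on non-positive bases (zero,
-- duplicate and negative powers), an accident of the helper parameter that B does not
-- reproduce (B may even raise IndexError there).
def Pre_power_sum (x : Int) (n : Int) (num : Int) : Prop :=
  x ≤ 0 ∨ (1 ≤ n ∧ 1 ≤ num)
instance (x : Int) (n : Int) (num : Int) : Decidable (Pre_power_sum x n num) := by
  unfold Pre_power_sum; infer_instance

def pvWitness_power_sum : Int × Int × Int := (10, 2, 1)

def Spec_power_sum (x : Int) (n : Int) (num : Int) (out : Int) : Prop := out = power_sum_alt x n num
instance (x : Int) (n : Int) (num : Int) (out : Int) : Decidable (Spec_power_sum x n num out) := by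
  unfold Spec_power_sum; infer_instance

-- ===== CLAIM (what is proved, stated in full; the proofs are below) =====
def Claim_equal_power_sum : Prop := ∀ (x : Int) (n : Int) (num : Int), Dom_power_sum x n num → Pre_power_sum x n num → Spec_power_sum x n num (power_sum x n num)

-- ===== LEMMAS AND PROOFS =====

-- number of (multi-)subsets of the list ps whose sum is s
def cnt : List Int → Int → Int
  | [], s => if s = 0 then 1 else 0
  | p :: ps, s => cnt ps (s - p) + cnt ps s

-- the powers k^n, (k+1)^n, …, (k+m-1)^n
def powList (n : Int) (k : Int) : Nat → List Int
  | 0 => []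
  | m + 1 => k ^ n.toNat :: powList n (k + 1) m

theorem powList_mem {n k : Int} {m : Nat} {e : Int} (h : e ∈ powList n k m) :
    ∃ i : Int, k ≤ i ∧ i < k + m ∧ e = i ^ n.toNat := by
  induction m generalizing k with
  | zero => simp [powList] at h
  | succ m ih =>
    simp only [powList, List.mem_cons] at h
    rcases h with h | h
    · exact ⟨k, le_refl k, by omega, h⟩
    · obtain ⟨i, h1, h2, h3⟩ := ih h
      exact ⟨i, by omega, by omega, h3⟩

theorem cnt_neg {l : List Int} {s : Int} (hl : ∀ e ∈ l, 0 ≤ e) (hs : s < 0) : cnt l s = 0 := by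
  induction l generalizing s with
  | nil => simp [cnt]; omega
  | cons p ps ih =>
    have hp : 0 ≤ p := hl p (by simp)
    have hps : ∀ e ∈ ps, 0 ≤ e := fun e he => hl e (by simp [he])
    simp [cnt, ih hps hs, ih hps (show s - p < 0 by omega)]

theorem cnt_zero {l : List Int} (hl : ∀ e ∈ l, 1 ≤ e) : cnt l 0 = 1 := by
  induction l with
  | nil => simp [cnt]
  | cons p ps ih =>
    have hp : 1 ≤ p := hl p (by simp)
    have hps : ∀ e ∈ ps, 1 ≤ e := fun e he => hl e (by simp [he])
    have h0 : cnt ps (-p) = 0 :=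
      cnt_neg (fun e he => by have := hps e he; omega) (by omega)
    simp [cnt, h0, ih hps]

theorem cnt_big {l : List Int} {s : Int} (hl : ∀ e ∈ l, s < e) (hs : 0 < s) : cnt l s = 0 := by
  induction l with
  | nil => simp [cnt]; omega
  | cons p ps ih =>
    have hp : s < p := hl p (by simp)
    have hps : ∀ e ∈ ps, s < e := fun e he => hl e (by simp [he])
    have h1 : cnt ps (s - p) = 0 :=
      cnt_neg (fun e he => by have := hps e he; omega) (by omega)
    simp [cnt, h1, ih hps]

theorem cnt_append_single (l : List Int) (p s : Int) :
    cnt (l ++ [p]) s = cnt l (s - p) + cnt l s := by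
  induction l generalizing s with
  | nil => simp [cnt]
  | cons q ps ih =>
    have e : s - q - p = s - p - q := by ring
    simp only [List.cons_append, cnt, ih, e]
    ring

-- appending powers that all exceed b does not change any count cnt · s with s ≤ b
theorem cnt_drop_big {pref ext : List Int} {s b : Int}
    (hpref : ∀ e ∈ pref, 0 ≤ e) (hext : ∀ e ∈ ext, 1 ≤ e ∧ b < e) (hs : s ≤ b) :
    cnt (pref ++ ext) s = cnt pref s := by
  induction pref generalizing s with
  | nil =>
    simp only [List.nil_append, cnt]
    rcases lt_trichotomy s 0 with h | h | h
    · rw [cnt_neg (fun e he => by have := (hext e he).1; omega) h]; simp; omega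
    · subst h; rw [cnt_zero (fun e he => (hext e he).1)]; simp
    · rw [cnt_big (fun e he => by have := (hext e he).2; omega) h]; simp; omega
  | cons q ps ih =>
    have hq : 0 ≤ q := hpref q (by simp)
    have hps : ∀ e ∈ ps, 0 ≤ e := fun e he => hpref e (by simp [he])
    simp only [List.cons_append, cnt]
    rw [ih hps (show s - q ≤ b by omega), ih hps hs]

-- A's recursion computes the subset count over any long-enough run of powers
theorem goA_eq_cnt (n : Int) (hn : 1 ≤ n) :
    ∀ (f m : Nat) (s k : Int), 1 ≤ k → (s + 1 - k).toNat + 1 ≤ f → s < k + m →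
      powerSumGoA n f s k = cnt (powList n k m) s := by
  intro f
  induction f with
  | zero => intro m s k _ hf _; omega
  | succ f ih =>
    intro m s k hk hf hm
    have hne : n.toNat ≠ 0 := by omega
    have hpow1 : ∀ i : Int, k ≤ i → 1 ≤ i ^ n.toNat := fun i hi =>
      one_le_pow₀ (by omega)
    rcases lt_trichotomy s 0 with hs | hs | hs
    · -- s < 0
      rw [show powerSumGoA n (f+1) s k = 0 by
        simp only [powerSumGoA]; rw [if_neg (by omega), if_pos hs]]
      rw [cnt_neg (fun e he => by obtain ⟨i, h1, _, h3⟩ := powList_mem he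
                                  have := hpow1 i h1; omega) hs]
    · -- s = 0
      subst hs
      rw [show powerSumGoA n (f+1) 0 k = 1 by simp [powerSumGoA]]
      rw [cnt_zero (fun e he => by obtain ⟨i, h1, _, h3⟩ := powList_mem he
                                   have := hpow1 i h1; omega)]
    · -- s > 0
      have hk_pow : k ≤ k ^ n.toNat := le_self_pow₀ (by omega) hne
      by_cases hg : k ^ n.toNat > s
      · -- guard prunes
        rw [show powerSumGoA n (f+1) s k = 0 by
          simp only [powerSumGoA]
          rw [if_neg (by omega), if_neg (by omega), if_pos hg]]
        rw [cnt_big (fun e he => by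
          obtain ⟨i, h1, _, h3⟩ := powList_mem he
          have : k ^ n.toNat ≤ i ^ n.toNat := pow_le_pow_left₀ (by omega) h1 n.toNat
          omega) hs]
      · -- recursive case
        rw [not_lt] at hg
        have hks : k ≤ s := le_trans hk_pow hg
        obtain ⟨m', rfl⟩ : ∃ m', m = m' + 1 := ⟨m - 1, by omega⟩
        have hstep : powerSumGoA n (f+1) s k =
            powerSumGoA n f (s - k ^ n.toNat) (k + 1) + powerSumGoA n f s (k + 1) := by
          simp only [powerSumGoA]
          rw [if_neg (by omega), if_neg (by omega), if_neg (by omega)]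
        have hp1 : 1 ≤ k ^ n.toNat := hpow1 k (le_refl k)
        rw [hstep, powList, cnt]
        rw [ih m' (s - k ^ n.toNat) (k + 1) (by omega) (by omega) (by omega)]
        rw [ih m' s (k + 1) (by omega) (by omega) (by omega)]

-- the inner countdown loop performs the simultaneous update on indices p ≤ t ≤ a
theorem inner_eq (p : Int) (hp : 1 ≤ p) :
    ∀ (m : Nat) (a : Int) (w : Int → Int), (a + 1 - p).toNat = m →
      (PySem.List.pyRange a (p - 1) (-1)).foldl (pvUpd p) w =
        fun t => if p ≤ t ∧ t ≤ a then w t + w (t - p) else w t := by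
  intro m
  induction m with
  | zero =>
    intro a w hm
    rw [PySem.List.pyRange_neg_one_eq_nil (by omega)]
    funext t
    simp only [List.foldl_nil]
    rw [if_neg (by omega)]
  | succ m ih =>
    intro a w hm
    rw [PySem.List.pyRange_neg_one_cons (by omega)]
    simp only [List.foldl_cons]
    rw [ih (a - 1) (pvUpd p w a) (by omega)]
    have hpa : p ≤ a := by omega
    funext t
    by_cases h1 : p ≤ t ∧ t ≤ a - 1
    · rw [if_pos h1, if_pos (show p ≤ t ∧ t ≤ a by omega)]
      simp only [pvUpd]
      rw [if_neg (by omega), if_neg (by omega)]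
    · rw [if_neg h1]
      by_cases h2 : t = a
      · subst h2
        simp [pvUpd, hpa]
      · simp only [pvUpd]
        rw [if_neg h2, if_neg (by omega)]

-- B's while-loop extends the DP table by the subset counts over the remaining powers
theorem goB_eq_cnt (n x : Int) (hn : 1 ≤ n) :
    ∀ (f m : Nat) (k : Int) (w : Int → Int) (pref : List Int), 1 ≤ k →
      (x + 1 - k).toNat ≤ f → x < k + m →
      (∀ e ∈ pref, 1 ≤ e) →
      (∀ t, t ≤ x → w t = cnt pref t) →
      powerSumGoB n x f k w x = cnt (pref ++ powList n k m) x := by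
  intro f
  have hne : n.toNat ≠ 0 := by omega
  induction f with
  | zero =>
    intro m k w pref hk hf hm hpref hw
    have hkx : x < k := by omega
    simp only [powerSumGoB]
    rw [cnt_drop_big (fun e he => by have := hpref e he; omega)
      (fun e he => by
        obtain ⟨i, h1, _, h3⟩ := powList_mem he
        have hi1 : 1 ≤ i ^ n.toNat := one_le_pow₀ (by omega)
        have : i ≤ i ^ n.toNat := le_self_pow₀ (by omega) hne
        exact ⟨by omega, by omega⟩) (le_refl x)]
    exact hw x (le_refl x)
  | succ f ih =>
    intro m k w pref hk hf hm hpref hw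
    by_cases hg : k ^ n.toNat ≤ x
    · -- one more base processed
      have hp1 : 1 ≤ k ^ n.toNat := one_le_pow₀ (by omega)
      have hks : k ≤ x := le_trans (le_self_pow₀ (by omega) hne) hg
      obtain ⟨m', rfl⟩ : ∃ m', m = m' + 1 := ⟨m - 1, by omega⟩
      rw [show powerSumGoB n x (f+1) k w =
        powerSumGoB n x f (k+1) (pvInner x (k ^ n.toNat) w) by simp [powerSumGoB, hg]]
      rw [powList, show (pref ++ (k ^ n.toNat :: powList n (k+1) m')) =
        ((pref ++ [k ^ n.toNat]) ++ powList n (k+1) m') by simp]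
      apply ih m' (k+1) _ (pref ++ [k ^ n.toNat]) (by omega) (by omega) (by omega)
      · intro e he
        rcases List.mem_append.mp he with h | h
        · exact hpref e h
        · simp at h; omega
      · intro t ht
        have hinner : ∀ u : Int, pvInner x (k ^ n.toNat) w u =
            if k ^ n.toNat ≤ u ∧ u ≤ x then w u + w (u - k ^ n.toNat) else w u := fun u =>
          congrFun (inner_eq (k ^ n.toNat) hp1 ((x + 1 - k ^ n.toNat).toNat) x w rfl) u
        rw [hinner t, cnt_append_single]
        by_cases hcase : k ^ n.toNat ≤ t
        · rw [if_pos ⟨hcase, ht⟩, hw t ht, hw (t - k ^ n.toNat) (by omega)]; ring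
        · rw [if_neg (by omega), hw t ht,
            cnt_neg (fun e he => by have := hpref e he; omega)
              (show t - k ^ n.toNat < 0 by omega)]
          ring
    · -- loop exits: all remaining powers exceed x
      rw [not_le] at hg
      rw [show powerSumGoB n x (f+1) k w = w by
        simp only [powerSumGoB]; rw [if_neg (by omega)]]
      rw [cnt_drop_big (fun e he => by have := hpref e he; omega)
        (fun e he => by
          obtain ⟨i, h1, _, h3⟩ := powList_mem he
          have hi1 : 1 ≤ i ^ n.toNat := one_le_pow₀ (by omega)
          have : k ^ n.toNat ≤ i ^ n.toNat := pow_le_pow_left₀ (by omega) h1 n.toNat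
          exact ⟨by omega, by omega⟩) (le_refl x)]
      exact hw x (le_refl x)

-- ===== VERDICT (by name: the statement is the Claim_ definition above) =====
theorem power_sum_spec : Claim_equal_power_sum := by
  intro x n num _ hpre
  unfold Spec_power_sum power_sum power_sum_alt
  rcases lt_trichotomy x 0 with hx | hx | hx
  · rw [show powerSumGoA n ((x + 1 - num).toNat + 1) x num = 0 by
      simp only [powerSumGoA]; rw [if_neg (by omega), if_pos hx]]
    rw [if_neg (by omega), if_pos hx]
  · subst hx
    rw [show powerSumGoA n ((0 + 1 - num).toNat + 1) 0 num = 1 by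
      simp [powerSumGoA]]
    rw [if_pos rfl]
  · obtain ⟨hn, hnum⟩ : 1 ≤ n ∧ 1 ≤ num := by
      rcases hpre with h | h
      · omega
      · exact h
    rw [if_neg (by omega), if_neg (by omega)]
    rw [goA_eq_cnt n hn ((x + 1 - num).toNat + 1) ((x + 1 - num).toNat) x num hnum
      (le_refl _) (by omega)]
    rw [goB_eq_cnt n x hn ((x + 1 - num).toNat) ((x + 1 - num).toNat) num
      (fun t => if t = 0 then 1 else 0) [] hnum (le_refl _) (by omega)
      (by intro e he; simp at he)
      (by intro t _; simp [cnt])]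
    simp
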